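-- pv_equiv track=rewrite | github.com/namantejaswi/Programming_Practice | hasmap_custom.py | solution
-- ===== SOURCE A (Python) =====
-- def solution(queryType, query):
--     ans = 0
--     hmap = {}
--     ck = 0
--     cv = 0
--     for i in range(len(queryType)):
--         cmd = queryType[i]
--         quer = query[i]
--         if cmd == "insert":
--             key,val = quer[0],quer[1]
--             hmap[key-ck]=val-cv
--         elif cmd == "addToValue":
--             k = quer[0]
--             cv+=k
--         elif cmd == "addToKey":
--             k = quer[0]
--             ck+=k
--         else:
--             k = quer[0]
--             k-=ck
--             val = hmap[k] + cv
--             ans = ans + val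
--     return ans
-- ===== SOURCE B (Python) =====
-- def solution(queryType, query):
--     # pass 1: annotate each query with the key/value offsets in force before it
--     rows = []
--     ck = cv = 0
--     for cmd, quer in zip(queryType, query):
--         rows.append((cmd, quer, ck, cv))
--         if cmd == "addToKey":
--             ck += quer[0]
--         elif cmd == "addToValue":
--             cv += quer[0]
--     # pass 2: answer each get by scanning backwards over earlier inserts
--     ans = 0
--     seen = []  # insert rows with their offsets, newest last
--     for cmd, quer, ck, cv in rows:
--         if cmd == "insert":
--             seen.append((quer, ck, cv))
--         elif cmd not in ("addToKey", "addToValue"):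
--             target = quer[0] - ck
--             for q2, ck2, cv2 in reversed(seen):
--                 if q2[0] - ck2 == target:
--                     ans += q2[1] - cv2 + cv
--                     break
--             else:
--                 raise KeyError(target)
--     return ans
-- ===== Notes on version B (the rewrite author's own statement) =====
-- stated objective: alternative
-- what changed: B drops A's dict entirely: a first pass annotates every query with the key/value offsets in force before it, and each get is answered by scanning backwards over earlier annotated insert rows for the last one whose normalized key matches.
import Mathlib
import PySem

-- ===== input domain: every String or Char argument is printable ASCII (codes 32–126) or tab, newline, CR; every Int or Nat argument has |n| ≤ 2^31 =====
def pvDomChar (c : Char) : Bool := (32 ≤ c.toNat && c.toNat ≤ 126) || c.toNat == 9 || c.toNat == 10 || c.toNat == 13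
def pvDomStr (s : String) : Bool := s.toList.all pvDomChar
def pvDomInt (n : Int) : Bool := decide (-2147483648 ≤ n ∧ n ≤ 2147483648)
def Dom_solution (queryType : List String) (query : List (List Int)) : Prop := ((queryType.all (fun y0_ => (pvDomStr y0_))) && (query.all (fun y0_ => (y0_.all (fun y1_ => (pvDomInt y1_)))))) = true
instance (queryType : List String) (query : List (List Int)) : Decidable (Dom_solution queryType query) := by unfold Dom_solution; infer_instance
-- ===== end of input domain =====

-- B drops A's dict + lazy offsets: it annotates every query with the offsets in force before
-- it, then answers each get by scanning backwards over earlier insert rows (objective: an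
-- alternative dict-free algorithm; not faster).

-- ===== PORT A =====
-- A's loop: state (ans, hmap, ck, cv); `none` marks the point where the Python raises
-- (IndexError on query[i]/quer[j], KeyError on a missing get key).
def loopA : List String → List (List Int) → Int → PySem.Dict Int Int → Int → Int → Option Int
  | [], _, ans, _, _, _ => some ans
  | cmd :: qt, query, ans, hmap, ck, cv =>
    match query with
    | [] => none
    | quer :: qs =>
      if cmd == "insert" then
        match PySem.List.pyGet? quer 0, PySem.List.pyGet? quer 1 with
        | some key, some val => loopA qt qs ans (hmap.insert (key - ck) (val - cv)) ck cv
        | _, _ => none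
      else if cmd == "addToValue" then
        match PySem.List.pyGet? quer 0 with
        | some k => loopA qt qs ans hmap ck (cv + k)
        | none => none
      else if cmd == "addToKey" then
        match PySem.List.pyGet? quer 0 with
        | some k => loopA qt qs ans hmap (ck + k) cv
        | none => none
      else
        match PySem.List.pyGet? quer 0 with
        | some k =>
          match hmap.get? (k - ck) with
          | some v => loopA qt qs (ans + (v + cv)) hmap ck cv
          | none => none
        | none => none

def solution (queryType : List String) (query : List (List Int)) : Int :=
  (loopA queryType query 0 PySem.Dict.empty 0 0).getD 0

-- ===== PORT B =====
-- B pass 1: annotate each (cmd, quer) with the key/value offsets (ck, cv) in force before it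
-- (`none` = the IndexError on quer[0] of an empty addToKey/addToValue row).
def annotate : List (String × List Int) → Int → Int → Option (List (String × List Int × Int × Int))
  | [], _, _ => some []
  | (cmd, quer) :: rest, ck, cv =>
    match (if cmd == "addToKey" then PySem.List.pyGet? quer 0 else some 0),
          (if cmd == "addToValue" then PySem.List.pyGet? quer 0 else some 0) with
    | some dk, some dv => (annotate rest (ck + dk) (cv + dv)).map ((cmd, quer, ck, cv) :: ·)
    | _, _ => none

-- B's inner backward scan over `reversed(seen)` (seen is kept newest-first here, so this
-- walks it front to back); `none` = the KeyError raised when no insert matches.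
def scanB : List (List Int × Int × Int) → Int → Option Int
  | [], _ => none
  | (q2, ck2, cv2) :: rest, target =>
    match PySem.List.pyGet? q2 0 with
    | some k2 =>
      if k2 - ck2 == target then (PySem.List.pyGet? q2 1).map (fun v2 => v2 - cv2)
      else scanB rest target
    | none => none

-- B pass 2 over the annotated rows: collect insert rows (newest first), answer gets by scanB.
def loopG : List (String × List Int × Int × Int) → List (List Int × Int × Int) → Int → Option Int
  | [], _, ans => some ans
  | (cmd, quer, ck, cv) :: rest, seen, ans =>
    if cmd == "insert" then loopG rest ((quer, ck, cv) :: seen) ans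
    else if cmd == "addToKey" || cmd == "addToValue" then loopG rest seen ans
    else
      match PySem.List.pyGet? quer 0 with
      | some k =>
        match scanB seen (k - ck) with
        | some base => loopG rest seen (ans + (base + cv))
        | none => none
      | none => none

def solution_alt (queryType : List String) (query : List (List Int)) : Int :=
  match annotate (queryType.zip query) 0 0 with
  | some rows => (loopG rows [] 0).getD 0
  | none => 0

-- ===== PRECONDITION & SPEC =====
-- cumulative key offset before query t (prefix sum of addToKey amounts)
def ckAt (queryType : List String) (query : List (List Int)) (t : Nat) : Int :=
  ((List.range t).map (fun s =>
    if queryType.getD s "" == "addToKey" then (query.getD s []).getD 0 0 else 0)).sum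

-- Pre_ excludes exactly the inputs where the Python A raises: query shorter than queryType
-- or a query row too short (IndexError), or a get on a key no prior insert (shifted by the
-- intervening addToKey offsets) has stored (KeyError).
def Pre_solution (queryType : List String) (query : List (List Int)) : Prop :=
  queryType.length ≤ query.length ∧
  (∀ p ∈ queryType.zip query, (if p.1 = "insert" then 2 else 1) ≤ p.2.length) ∧
  ∀ i < queryType.length,
    queryType.getD i "" ≠ "insert" → queryType.getD i "" ≠ "addToValue" →
    queryType.getD i "" ≠ "addToKey" →
      ∃ j < i, queryType.getD j "" = "insert" ∧
        (query.getD j []).getD 0 0 - ckAt queryType query j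
          = (query.getD i []).getD 0 0 - ckAt queryType query i
instance (queryType : List String) (query : List (List Int)) : Decidable (Pre_solution queryType query) := by unfold Pre_solution; infer_instance

def pvWitness_solution : List String × List (List Int) :=
  (["insert", "addToKey", "addToValue", "get", "insert", "get"],
   [[1, 2], [5], [3], [6], [6, 0], [6]])

def Spec_solution (queryType : List String) (query : List (List Int)) (out : Int) : Prop := out = solution_alt queryType query
instance (queryType : List String) (query : List (List Int)) (out : Int) : Decidable (Spec_solution queryType query out) := by unfold Spec_solution; infer_instance

-- ===== CLAIM (what is proved, stated in full; the proofs are below) =====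
def Claim_equal_solution : Prop := ∀ (queryType : List String) (query : List (List Int)), Dom_solution queryType query → Pre_solution queryType query → Spec_solution queryType query (solution queryType query)

-- ===== LEMMAS AND PROOFS =====

-- the lockstep invariant: the backward scan over B's seen rows computes A's dict lookup
lemma lockstep (qt : List String) : ∀ (q : List (List Int)) (ans ck cv : Int)
    (dA : PySem.Dict Int Int) (seen : List (List Int × Int × Int)),
    qt.length ≤ q.length →
    (∀ p ∈ qt.zip q, (if p.1 = "insert" then 2 else 1) ≤ p.2.length) →
    (∀ x, scanB seen x = dA.get? x) →
    ∃ rows, annotate (qt.zip q) ck cv = some rows ∧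
      loopG rows seen ans = loopA qt q ans dA ck cv := by
  induction qt with
  | nil =>
    intro q ans ck cv dA seen _ _ _
    exact ⟨[], rfl, by cases q <;> rfl⟩
  | cons cmd qt ih =>
    intro q ans ck cv dA seen hlen hwf hinv
    match q with
    | [] => simp at hlen
    | quer :: qs =>
      have hlen' : qt.length ≤ qs.length := by simpa using hlen
      have hwf' : ∀ p ∈ qt.zip qs, (if p.1 = "insert" then 2 else 1) ≤ p.2.length := by
        intro p hp; exact hwf p (by simp [List.zip_cons_cons, hp])
      have hwfhd : (if cmd = "insert" then 2 else 1) ≤ quer.length :=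
        hwf (cmd, quer) (by simp [List.zip_cons_cons])
      rw [List.zip_cons_cons, annotate, loopA]
      by_cases h1 : cmd = "insert"
      · subst h1
        have h2 : quer.length ≥ 2 := by simpa using hwfhd
        match quer, h2 with
        | a :: b :: t, _ =>
          have hg0 : PySem.List.pyGet? (a :: b :: t) 0 = some a :=
            PySem.List.pyGet?_zero_cons a (b :: t)
          have hg1 : PySem.List.pyGet? (a :: b :: t) 1 = some b := by
            simp only [PySem.List.pyGet?, PySem.List.pyIdx?]
            norm_num
          simp only [hg0, hg1, show (("insert" : String) == "addToKey") = false from rfl,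
            show (("insert" : String) == "addToValue") = false from rfl,
            show (("insert" : String) == "insert") = true from rfl,
            if_true, if_false, Bool.false_eq_true, add_zero]
          have hinv' : ∀ x, scanB ((a :: b :: t, ck, cv) :: seen) x
              = (dA.insert (a - ck) (b - cv)).get? x := by
            intro x
            rw [scanB, hg0, hg1, PySem.Dict.get?_insert]
            by_cases hx : a - ck = x
            · simp [hx]
            · have hbx : (a - ck == x) = false := by simpa using hx
              simp only [hbx, Bool.false_eq_true, if_false, hinv x]
              rw [if_neg (fun h => hx h.symm)]
          obtain ⟨rows', ha', he'⟩ := ih qs ans ck cv (dA.insert (a - ck) (b - cv))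
            ((a :: b :: t, ck, cv) :: seen) hlen' hwf' hinv'
          refine ⟨("insert", a :: b :: t, ck, cv) :: rows', by rw [ha']; rfl, ?_⟩
          rw [loopG]
          simpa using he'
      · have h2 : quer.length ≥ 1 := by simpa [h1] using hwfhd
        match quer, h2 with
        | a :: t, _ =>
          have hg0 : PySem.List.pyGet? (a :: t) 0 = some a :=
            PySem.List.pyGet?_zero_cons a t
          have hb1 : (cmd == "insert") = false := by simpa using h1
          by_cases h2v : cmd = "addToValue"
          · subst h2v
            simp only [hg0, show (("addToValue" : String) == "addToKey") = false from rfl,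
              show (("addToValue" : String) == "addToValue") = true from rfl,
              show (("addToValue" : String) == "insert") = false from rfl,
              if_true, if_false, Bool.false_eq_true, add_zero]
            obtain ⟨rows', ha', he'⟩ := ih qs ans ck (cv + a) dA seen hlen' hwf' hinv
            refine ⟨("addToValue", a :: t, ck, cv) :: rows', by rw [ha']; rfl, ?_⟩
            rw [loopG]
            simpa using he'
          · by_cases h3 : cmd = "addToKey"
            · subst h3
              simp only [hg0, show (("addToKey" : String) == "addToKey") = true from rfl,
                show (("addToKey" : String) == "addToValue") = false from rfl,
                show (("addToKey" : String) == "insert") = false from rfl,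
                if_true, if_false, Bool.false_eq_true, add_zero]
              obtain ⟨rows', ha', he'⟩ := ih qs ans (ck + a) cv dA seen hlen' hwf' hinv
              refine ⟨("addToKey", a :: t, ck, cv) :: rows', by rw [ha']; rfl, ?_⟩
              rw [loopG]
              simpa using he'
            · -- get
              have hb2 : (cmd == "addToValue") = false := by simpa using h2v
              have hb3 : (cmd == "addToKey") = false := by simpa using h3
              simp only [hg0, hb1, hb2, hb3, Bool.false_eq_true, if_false, add_zero]
              obtain ⟨rows', ha', _⟩ := ih qs ans ck cv dA seen hlen' hwf' hinv
              cases hd : dA.get? (a - ck) with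
              | none =>
                refine ⟨(cmd, a :: t, ck, cv) :: rows', by rw [ha']; rfl, ?_⟩
                rw [loopG]
                simp only [hb1, hb2, hb3, Bool.false_eq_true, if_false, Bool.or_self, hg0]
                rw [hinv (a - ck), hd]
              | some v =>
                obtain ⟨rows'', ha'', he''⟩ := ih qs (ans + (v + cv)) ck cv dA seen hlen' hwf' hinv
                refine ⟨(cmd, a :: t, ck, cv) :: rows'', by rw [ha'']; rfl, ?_⟩
                rw [loopG]
                simp only [hb1, hb2, hb3, Bool.false_eq_true, if_false, Bool.or_self, hg0]
                rw [hinv (a - ck), hd]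
                exact he''

-- ===== VERDICT (by name: the statement is the Claim_ definition above) =====
theorem solution_spec : Claim_equal_solution := by
  intro qt q _ hpre
  unfold Spec_solution solution solution_alt
  obtain ⟨rows, ha, he⟩ := lockstep qt q 0 0 0 PySem.Dict.empty [] hpre.1 hpre.2.1
    (fun x => by simp [scanB, PySem.Dict.get?_empty])
  simp only [ha]
  rw [he]
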